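-- pv_equiv track=rewrite | github.com/StewartLwson/algcomp | algorithms/geneticalgorithm.py | scale_fitness
-- ===== SOURCE A (Python) =====
-- def scale_fitness(scale, melody):
--     score = 0
--     for c, v in enumerate(melody):
--         if v != "-":
--             score += 1 if v in scale else -1
--         else:
--             score += 1
--     return score
-- ===== SOURCE B (Python) =====
-- def scale_fitness(scale, melody):
--     # Stage 1: frequency table of the melody; hash the scale for O(1) membership.
--     counts = {}
--     for v in melody:
--         counts[v] = counts.get(v, 0) + 1
--     scale_set = set(scale)
--     # Stage 2: score each distinct note once, weighted by its multiplicity.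
--     score = 0
--     for v, k in counts.items():
--         score += k if v == "-" or v in scale_set else -k
--     return score
-- ===== Notes on version B (the rewrite author's own statement) =====
-- stated objective: faster
-- what changed: Builds a frequency dictionary of the melody and a hash set of the scale, then scores each DISTINCT note once (count if '-' or in the set, else -count), instead of A's per-element +1/-1 accumulation with a linear scale scan for every melody element.
import Mathlib
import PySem

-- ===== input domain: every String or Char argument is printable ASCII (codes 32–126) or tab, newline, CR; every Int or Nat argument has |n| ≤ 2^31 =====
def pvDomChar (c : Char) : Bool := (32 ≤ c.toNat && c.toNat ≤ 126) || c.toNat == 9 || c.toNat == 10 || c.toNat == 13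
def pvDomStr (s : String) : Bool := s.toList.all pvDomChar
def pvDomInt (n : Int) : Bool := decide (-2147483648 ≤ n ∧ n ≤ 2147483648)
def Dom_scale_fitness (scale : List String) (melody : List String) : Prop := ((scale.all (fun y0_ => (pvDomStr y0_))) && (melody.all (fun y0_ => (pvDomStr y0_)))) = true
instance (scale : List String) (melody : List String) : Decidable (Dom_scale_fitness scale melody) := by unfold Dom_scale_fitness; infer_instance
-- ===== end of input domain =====

-- B builds a frequency dictionary of the melody and a hash set of the scale, then scores each
-- distinct note once (count if '-' or in the set, else -count) instead of A's per-element
-- +1/-1 accumulation with a scale scan per element (objective: faster).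

-- ===== PORT A =====
def scale_fitness (scale : List String) (melody : List String) : Int :=
  (PySem.List.enumerate melody).foldl
    (fun score cv =>
      if cv.2 ≠ "-" then score + (if scale.contains cv.2 then 1 else -1)
      else score + 1)
    0

-- ===== PORT B =====
def scale_fitness_alt (scale : List String) (melody : List String) : Int :=
  let counts : PySem.Dict String Int :=
    melody.foldl (fun d v => d.insert v (d.getD v 0 + 1)) PySem.Dict.empty
  let scaleSet := PySem.Set.ofList scale
  counts.items.foldl
    (fun score vk =>
      score + (if vk.1 == "-" || scaleSet.contains vk.1 then vk.2 else -vk.2))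
    0

-- ===== PRECONDITION & SPEC =====
def Spec_scale_fitness (scale : List String) (melody : List String) (out : Int) : Prop := out = scale_fitness_alt scale melody
instance (scale : List String) (melody : List String) (out : Int) : Decidable (Spec_scale_fitness scale melody out) := by unfold Spec_scale_fitness; infer_instance

-- ===== CLAIM (what is proved, stated in full; the proofs are below) =====
def Claim_equal_scale_fitness : Prop := ∀ (scale : List String) (melody : List String), Dom_scale_fitness scale melody → Spec_scale_fitness scale melody (scale_fitness scale melody)

-- ===== LEMMAS AND PROOFS =====

-- the per-note weight both programs realize
def pvWeight (scale : List String) (v : String) : Int :=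
  if v == "-" || scale.contains v then 1 else -1

-- A is the plain sum of weights over the melody
theorem scale_fitness_eq_sum (scale melody : List String) :
    scale_fitness scale melody = (melody.map (pvWeight scale)).sum := by
  unfold scale_fitness
  rw [show (fun (score : Int) (cv : Int × String) =>
        if cv.2 ≠ "-" then score + (if scale.contains cv.2 then 1 else -1)
        else score + 1)
      = (fun score cv => score + pvWeight scale cv.2) from by
    funext score cv; unfold pvWeight; by_cases h : cv.2 = "-" <;> simp [h]]
  rw [PySem.List.foldl_add]
  conv_rhs => rw [← PySem.List.map_snd_enumerate melody 0, List.map_map]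
  simp [Function.comp_def]

-- B is the sum of count · weight over the distinct notes
theorem scale_fitness_alt_eq_sum (scale melody : List String) :
    scale_fitness_alt scale melody
      = ((PySem.Set.ofList melody).map
          (fun v => (melody.count v : Int) * pvWeight scale v)).sum := by
  unfold scale_fitness_alt
  rw [PySem.Dict.foldl_insert_getD_add_one_eq_counter, PySem.List.foldl_add,
    PySem.Dict.items_counter, List.map_map]
  rw [show ((fun (vk : String × Int) =>
        if vk.1 == "-" || (PySem.Set.ofList scale).contains vk.1 then vk.2 else -vk.2) ∘
        fun k => (k, (melody.count k : Int)))
      = fun v => (melody.count v : Int) * pvWeight scale v from by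
    funext v; unfold pvWeight; simp only [Function.comp_apply]
    rw [show ((PySem.Set.ofList scale).contains v) = scale.contains v from by
      by_cases h : v ∈ scale <;> simp [h, PySem.Set.mem_ofList]]
    cases (v == "-" || scale.contains v)
    · simp only [Bool.false_eq_true, if_false, mul_neg_one]
    · simp only [if_true, mul_one] ]
  simp

theorem scale_fitness_spec : Claim_equal_scale_fitness := by
  intro scale melody _
  unfold Spec_scale_fitness
  rw [scale_fitness_eq_sum, scale_fitness_alt_eq_sum]
  rw [List.sum_toFinset _ (PySem.Set.nodup_ofList melody) |>.symm]
  rw [show (PySem.Set.ofList melody).toFinset = melody.toFinset from by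
    ext x; simp [PySem.Set.mem_ofList]]
  rw [Finset.sum_list_map_count melody (pvWeight scale)]
  refine Finset.sum_congr rfl (fun v _ => ?_)
  simp
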